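-- pv_equiv track=rewrite | github.com/thepauljones/advent-of-code | 2023/day13/02.py | is_horizontally_symmetrical_at
-- ===== SOURCE A (Python) =====
-- def split_mirror_horizontally_at(mirror, i):
--     top = []
--     bottom = []
--
--     for y in range(len(mirror)):
--         if y >= i:
--             bottom.append(mirror[y])
--         else:
--             top.append(mirror[y])
--
--     top.reverse()
--
--     min_length = min(len(top), len(bottom))
--
--     top = top[:min_length]
--     bottom = bottom[:min_length]
--
--     return top, bottom
--
-- def is_horizontally_symmetrical_at(mirror, i):
--     if i > len(mirror):
--         return False
--
--     if i == 0:
--         return False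
--
--     top, bottom = split_mirror_horizontally_at(mirror, i)
--
--     is_symmetrical = True
--     for j in range(len(top)):
--         if top[j] != bottom[j]:
--             is_symmetrical = False
--             break
--
--     if len(top) == 0 or len(bottom) == 0:
--         is_symmetrical = False
--
--     return is_symmetrical
-- ===== SOURCE B (Python) =====
-- def is_horizontally_symmetrical_at(mirror, i):
--     n = len(mirror)
--     if i <= 0 or i >= n:
--         return False
--     a, b = i - 1, i
--     while a >= 0 and b < n:
--         if mirror[a] != mirror[b]:
--             return False
--         a -= 1
--         b += 1
--     return True
-- ===== Notes on version B (the rewrite author's own statement) =====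
-- stated objective: simpler
-- what changed: Replaces building reversed top/bottom lists, truncating both to the overlap and comparing elementwise with a direct two-pointer scan (a=i-1 down, b=i up) on the original list, returning False on the first mismatch; the empty-overlap cases are handled by the i<=0 / i>=len guards.
import Mathlib
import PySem

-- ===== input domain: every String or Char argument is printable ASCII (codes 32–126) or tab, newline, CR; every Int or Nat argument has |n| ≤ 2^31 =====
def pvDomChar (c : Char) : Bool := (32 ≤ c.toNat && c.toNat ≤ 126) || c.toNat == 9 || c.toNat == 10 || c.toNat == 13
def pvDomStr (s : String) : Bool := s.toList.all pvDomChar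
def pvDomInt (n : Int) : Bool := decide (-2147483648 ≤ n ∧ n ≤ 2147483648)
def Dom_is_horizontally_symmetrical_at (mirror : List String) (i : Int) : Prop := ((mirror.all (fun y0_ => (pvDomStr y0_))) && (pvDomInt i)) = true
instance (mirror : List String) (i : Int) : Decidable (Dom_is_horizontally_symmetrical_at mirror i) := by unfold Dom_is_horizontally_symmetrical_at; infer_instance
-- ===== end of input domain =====

-- B replaces A's build-two-lists-reverse-truncate-compare with a direct two-pointer
-- converging scan on the original list (objective: simpler).

-- ===== PORT A =====
-- loop body of 'for y in range(len(mirror)) …' (y is always in range, so mirror[y] = pyGetD mirror y "")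
def splitStepA (mirror : List String) (i : Int) (tb : List String × List String) (y : Int) :
    List String × List String :=
  if y ≥ i then (tb.1, tb.2 ++ [PySem.List.pyGetD mirror y ""])
  else (tb.1 ++ [PySem.List.pyGetD mirror y ""], tb.2)

def split_mirror_horizontally_at (mirror : List String) (i : Int) : List String × List String :=
  let tb := (PySem.List.pyRange 0 (mirror.length : Int) 1).foldl (splitStepA mirror i) ([], [])
  let top := tb.1.reverse
  let bottom := tb.2
  let min_length := min top.length bottom.length
  -- top[:min_length] / bottom[:min_length] with 0 ≤ min_length ≤ length is List.take
  (top.take min_length, bottom.take min_length)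

-- 'for j in range(len(top)): if top[j] != bottom[j]: is_symmetrical = False; break'
-- walked in lockstep over the two (equal-length) lists
def symLoopA : List String → List String → Bool
  | t :: ts, u :: us => if t ≠ u then false else symLoopA ts us
  | _, _ => true

def is_horizontally_symmetrical_at (mirror : List String) (i : Int) : Bool :=
  if i > (mirror.length : Int) then false
  else if i = 0 then false
  else
    let tb := split_mirror_horizontally_at mirror i
    let is_symmetrical := symLoopA tb.1 tb.2
    if tb.1.length = 0 ∨ tb.2.length = 0 then false else is_symmetrical

-- ===== PORT B =====
-- 'while a >= 0 and b < n: …' (a, b stay in range under the guard, so mirror[a] = pyGetD mirror a "")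
def twoPtrB (mirror : List String) (a b : Int) : Bool :=
  if h : a ≥ 0 ∧ b < (mirror.length : Int) then
    if PySem.List.pyGetD mirror a "" ≠ PySem.List.pyGetD mirror b "" then false
    else twoPtrB mirror (a - 1) (b + 1)
  else true
termination_by (a + 1).toNat
decreasing_by omega

def is_horizontally_symmetrical_at_alt (mirror : List String) (i : Int) : Bool :=
  if i ≤ 0 ∨ i ≥ (mirror.length : Int) then false
  else twoPtrB mirror (i - 1) i

-- ===== PRECONDITION & SPEC =====
def Spec_is_horizontally_symmetrical_at (mirror : List String) (i : Int) (out : Bool) : Prop := out = is_horizontally_symmetrical_at_alt mirror i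
instance (mirror : List String) (i : Int) (out : Bool) : Decidable (Spec_is_horizontally_symmetrical_at mirror i out) := by unfold Spec_is_horizontally_symmetrical_at; infer_instance

-- ===== CLAIM (what is proved, stated in full; the proofs are below) =====
def Claim_equal_is_horizontally_symmetrical_at : Prop := ∀ (mirror : List String) (i : Int), Dom_is_horizontally_symmetrical_at mirror i → Spec_is_horizontally_symmetrical_at mirror i (is_horizontally_symmetrical_at mirror i)

-- ===== LEMMAS AND PROOFS =====

lemma symLoopA_nil_left (b : List String) : symLoopA [] b = true := by cases b <;> rfl

lemma symLoopA_nil_right (a : List String) : symLoopA a [] = true := by cases a <;> rfl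

-- A's partition loop over the first k indices yields (prefix below i, rest) of mirror.take k
lemma foldA_eq (mirror : List String) (i : Int) (k : Nat) (hk : k ≤ mirror.length) :
    (PySem.List.pyRange 0 (k : Nat) 1).foldl (splitStepA mirror i) ([], []) =
      ((mirror.take k).take i.toNat, (mirror.take k).drop i.toNat) := by
  induction k with
  | zero => simp [PySem.List.pyRange_one_eq_nil]
  | succ k ih =>
    have hk' : k < mirror.length := hk
    have hcast : ((k : Int) + 1) = ((k + 1 : Nat) : Int) := by push_cast; ring
    rw [← hcast, PySem.List.pyRange_one_succ_right (by positivity),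
      List.foldl_append, ih (Nat.le_of_lt hk')]
    have hget : PySem.List.pyGetD mirror (k : Int) "" = mirror[k] := by
      rw [PySem.List.pyGetD_natCast]; exact List.getD_eq_getElem mirror "" hk'
    have htake : mirror.take (k + 1) = mirror.take k ++ [mirror[k]] := by
      rw [List.take_add_one]; simp [List.getElem?_eq_getElem hk']
    simp only [List.foldl_cons, List.foldl_nil, splitStepA, hget]
    by_cases hik : (k : Int) ≥ i
    · have hle : i.toNat ≤ (mirror.take k).length := by simp; omega
      rw [if_pos hik]
      refine Prod.ext ?_ ?_
      · simp only
        rw [List.take_take, List.take_take]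
        congr 1
        omega
      · simp only
        rw [htake, List.drop_append_of_le_length hle]
    · have h1 : (mirror.take k).length ≤ i.toNat := by simp; omega
      have h2 : (mirror.take (k + 1)).length ≤ i.toNat := by simp; omega
      rw [if_neg hik]
      refine Prod.ext ?_ ?_
      · simp only
        rw [List.take_of_length_le h1, List.take_of_length_le h2, htake]
      · simp only
        rw [List.drop_of_length_le h1, List.drop_of_length_le h2]

-- truncating both lists to the shorter length does not change the lockstep compare
lemma symLoopA_take (a b : List String) :
    symLoopA (a.take (min a.length b.length)) (b.take (min a.length b.length)) = symLoopA a b := by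
  induction a generalizing b with
  | nil => simp [symLoopA_nil_left]
  | cons t ts ih =>
    cases b with
    | nil => simp [symLoopA_nil_right]
    | cons u us =>
      simp only [List.length_cons, Nat.succ_min_succ, List.take_succ_cons, symLoopA]
      split
      · rfl
      · exact ih us

-- B's two-pointer scan computes exactly A's lockstep compare of the reversed prefix and the suffix
lemma twoPtrB_eq (mirror : List String) (a : Nat) :
    ∀ b : Nat, a < mirror.length → twoPtrB mirror (a : Int) (b : Int) =
      symLoopA ((mirror.take (a + 1)).reverse) (mirror.drop b) := by
  induction a with
  | zero =>
    intro b ha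
    rw [twoPtrB]
    have htake : mirror.take 1 = [mirror[0]] := by
      rw [List.take_add_one]; simp [List.getElem?_eq_getElem ha]
    by_cases hb : b < mirror.length
    · rw [dif_pos ⟨by omega, by omega⟩]
      have hga : PySem.List.pyGetD mirror ((0 : Nat) : Int) "" = mirror[0] := by
        rw [PySem.List.pyGetD_natCast]; exact List.getD_eq_getElem mirror "" ha
      have hgb : PySem.List.pyGetD mirror (b : Int) "" = mirror[b] := by
        rw [PySem.List.pyGetD_natCast]; exact List.getD_eq_getElem mirror "" hb
      rw [htake, List.reverse_singleton, List.drop_eq_getElem_cons hb, hga, hgb]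
      simp only [symLoopA]
      by_cases hx : mirror[0] = mirror[b]
      · rw [if_neg (not_not_intro hx)]
        rw [twoPtrB]
        rw [dif_neg (show ¬(((0 : Nat) : Int) - 1 ≥ 0 ∧ ((b : Nat) : Int) + 1 < (mirror.length : Int)) by omega)]
        rw [if_neg (not_not_intro hx)]
      · rw [if_pos hx]
        rw [if_pos hx]
    · rw [dif_neg (by omega), List.drop_of_length_le (by omega), htake,
        List.reverse_singleton]
      exact (symLoopA_nil_right _).symm
  | succ a iha =>
    intro b ha
    rw [twoPtrB]
    have ha' : a < mirror.length := by omega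
    have htake : mirror.take (a + 1 + 1) = mirror.take (a + 1) ++ [mirror[a + 1]] := by
      rw [List.take_add_one]; simp [List.getElem?_eq_getElem ha]
    by_cases hb : b < mirror.length
    · rw [dif_pos ⟨by omega, by omega⟩]
      have hga : PySem.List.pyGetD mirror ((a + 1 : Nat) : Int) "" = mirror[a + 1] := by
        rw [PySem.List.pyGetD_natCast]; exact List.getD_eq_getElem mirror "" ha
      have hgb : PySem.List.pyGetD mirror (b : Int) "" = mirror[b] := by
        rw [PySem.List.pyGetD_natCast]; exact List.getD_eq_getElem mirror "" hb
      rw [htake, List.reverse_append, List.drop_eq_getElem_cons hb, hga, hgb]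
      simp only [List.reverse_singleton, List.singleton_append, symLoopA]
      by_cases hx : mirror[a + 1] = mirror[b]
      · rw [if_neg (not_not_intro hx)]
        have hc : ((a + 1 : Nat) : Int) - 1 = ((a : Nat) : Int) := by push_cast; ring
        have hb1 : ((b : Nat) : Int) + 1 = ((b + 1 : Nat) : Int) := by push_cast; ring
        rw [hc, hb1]
        rw [if_neg (not_not_intro hx)]
        exact iha (b + 1) ha'
      · rw [if_pos hx]
        rw [if_pos hx]
    · rw [dif_neg (by omega), List.drop_of_length_le (by omega)]
      exact (symLoopA_nil_right _).symm

-- ===== VERDICT (by name: the statement is the Claim_ definition above) =====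
theorem is_horizontally_symmetrical_at_spec : Claim_equal_is_horizontally_symmetrical_at := by
  intro mirror i _
  unfold Spec_is_horizontally_symmetrical_at
  unfold is_horizontally_symmetrical_at is_horizontally_symmetrical_at_alt
  have hsplit : split_mirror_horizontally_at mirror i =
      (((mirror.take i.toNat).reverse).take (min i.toNat (mirror.length - i.toNat)),
        (mirror.drop i.toNat).take (min i.toNat (mirror.length - i.toNat))) := by
    unfold split_mirror_horizontally_at
    rw [foldA_eq mirror i mirror.length le_rfl]
    simp
  by_cases hgt : i > (mirror.length : Int)
  · rw [if_pos hgt, if_pos (Or.inr (le_of_lt hgt))]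
  rw [if_neg hgt]
  by_cases hz : i = 0
  · rw [if_pos hz, if_pos (Or.inl (by omega))]
  rw [if_neg hz]
  by_cases hneg : i < 0
  · rw [if_pos (Or.inl (by omega : i ≤ 0))]
    have h0 : i.toNat = 0 := by omega
    simp [hsplit, h0]
  by_cases hn : i ≥ (mirror.length : Int)
  · rw [if_pos (Or.inr hn)]
    have hi : i.toNat = mirror.length := by omega
    simp [hsplit, hi]
  · rw [if_neg (show ¬(i ≤ 0 ∨ i ≥ (mirror.length : Int)) by omega)]
    have hipos : 0 < i.toNat := by omega
    have hilt : i.toNat < mirror.length := by omega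
    simp only [hsplit]
    rw [if_neg (show ¬(((mirror.take i.toNat).reverse.take
          (min i.toNat (mirror.length - i.toNat))).length = 0 ∨
        ((mirror.drop i.toNat).take (min i.toNat (mirror.length - i.toNat))).length = 0)
        by simp; omega)]
    have hmin : min i.toNat (mirror.length - i.toNat) =
        min ((mirror.take i.toNat).reverse).length (mirror.drop i.toNat).length := by
      simp only [List.length_reverse, List.length_take, List.length_drop]
      omega
    rw [hmin, symLoopA_take]
    have ht := twoPtrB_eq mirror (i.toNat - 1) i.toNat (by omega)
    rw [Nat.sub_add_cancel hipos] at ht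
    have hc1 : ((i.toNat - 1 : Nat) : Int) = i - 1 := by omega
    have hc2 : ((i.toNat : Nat) : Int) = i := by omega
    rw [hc1, hc2] at ht
    exact ht.symm
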